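-- pv_equiv track=rewrite | github.com/rntkdgnl932/excel_cal | vat_excel_tool.py | _int_to_korean_amount
-- ===== SOURCE A (Python) =====
-- from typing import List, Dict, Tuple, Optional
--
-- _KR_NUM = ["", "일", "이", "삼", "사", "오", "육", "칠", "팔", "구"]
--
-- _KR_UNIT_SMALL = ["", "십", "백", "천"]
--
-- _KR_UNIT_BIG = ["", "만", "억", "조", "경"]
--
-- def _int_to_korean_amount(n) -> str:
--     n = int(float(n))
--
--     if n == 0:
--         return "영"
--     if n < 0:
--         return "마이너스 " + _int_to_korean_amount(-n)
--
--     parts: List[str] = []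
--     unit_pos = 0
--
--     while n > 0:
--         four = n % 10000
--         n //= 10000
--
--         if four == 0:
--             unit_pos += 1
--             continue
--
--         small_parts: List[str] = []
--         for i in range(4):
--             digit = four % 10
--             four //= 10
--             if digit != 0:
--                 small = ""
--                 if not (digit == 1 and i > 0):
--                     small += _KR_NUM[digit]
--                 small += _KR_UNIT_SMALL[i]
--                 small_parts.append(small)
--         small_str = "".join(reversed(small_parts))
--
--         if _KR_UNIT_BIG[unit_pos]:
--             small_str += _KR_UNIT_BIG[unit_pos]
--
--         parts.append(small_str)
--         unit_pos += 1
--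
--     return " ".join(reversed(parts)).strip()
-- ===== SOURCE B (Python) =====
-- from typing import List
--
-- _KR_NUM = ["", "일", "이", "삼", "사", "오", "육", "칠", "팔", "구"]
--
-- _KR_UNIT_SMALL = ["", "십", "백", "천"]
--
-- _KR_UNIT_BIG = ["", "만", "억", "조", "경"]
--
-- def _int_to_korean_amount(n) -> str:
--     n = int(float(n))
--     if n == 0:
--         return "영"
--     if n < 0:
--         return "마이너스 " + _int_to_korean_amount(-n)
--
--     # one pass over the decimal digits (least significant first), building the
--     # result back-to-front and flushing each 4-digit group as it completes
--     digits = []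
--     while n:
--         digits.append(n % 10)
--         n //= 10
--     out = ""
--     group = ""
--     for p, d in enumerate(digits):
--         if d:
--             tok = ("" if (d == 1 and p % 4 != 0) else _KR_NUM[d]) + _KR_UNIT_SMALL[p % 4]
--             group = tok + group
--         if p % 4 == 3 or p == len(digits) - 1:
--             if group:
--                 piece = group + _KR_UNIT_BIG[p // 4]
--                 out = piece + " " + out if out else piece
--             group = ""
--     return out
-- ===== Notes on version B (the rewrite author's own statement) =====
-- stated objective: alternative
-- what changed: A repeatedly splits n into ten-thousands chunks with a nested per-chunk digit loop and two reversed joins; B extracts the decimal digit list once and makes a single enumerated pass over it, deriving each digit's small unit from its position mod four and the big unit from its position div four, flushing completed groups and building the result string back-to-front with no reversals or joins.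
import Mathlib
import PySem

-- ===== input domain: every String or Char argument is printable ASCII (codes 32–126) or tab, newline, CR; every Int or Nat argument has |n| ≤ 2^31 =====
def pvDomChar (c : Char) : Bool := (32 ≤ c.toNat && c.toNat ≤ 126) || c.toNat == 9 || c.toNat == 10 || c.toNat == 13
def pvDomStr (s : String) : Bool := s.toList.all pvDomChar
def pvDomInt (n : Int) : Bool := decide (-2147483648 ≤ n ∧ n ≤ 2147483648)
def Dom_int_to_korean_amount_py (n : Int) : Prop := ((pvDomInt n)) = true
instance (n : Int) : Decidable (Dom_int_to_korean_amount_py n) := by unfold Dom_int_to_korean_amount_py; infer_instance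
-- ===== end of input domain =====

-- B replaces A's nested chunk-of-10000 loop (inner 4-digit loop, two reversed joins)
-- with a single pass over the decimal digit list that flushes each 4-digit group and
-- builds the result string back-to-front (objective: alternative decomposition).

-- ===== PORT A =====
def krNum : List String := ["", "일", "이", "삼", "사", "오", "육", "칠", "팔", "구"]
def krSmall : List String := ["", "십", "백", "천"]
def krBig : List String := ["", "만", "억", "조", "경"]

-- the body of A's inner `for i in range(4)` loop; list indexing is ported with
-- pyGetD, exact whenever the index is in range (digit ∈ 0..9, i ∈ 0..3 always are)
def aStep (st : Int × List String) (i : Int) : Int × List String :=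
  let digit := PySem.Int.mod st.1 10
  let four' := PySem.Int.floordiv st.1 10
  if digit ≠ 0 then
    (four', st.2 ++ [(if ¬ (digit = 1 ∧ i > 0) then PySem.List.pyGetD krNum digit "" else "")
                      ++ PySem.List.pyGetD krSmall i ""])
  else (four', st.2)

def aInner (four : Int) : String :=
  PySem.Str.join "" (((PySem.List.pyRange 0 4 1).foldl aStep (four, [])).2.reverse)

-- A's `while n > 0` loop; `_KR_UNIT_BIG[unit_pos]` is ported with pyGetD, exact
-- whenever unit_pos ≤ 4, i.e. for every n < 10^20 (in particular on all of Dom)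
def aLoop (n : Int) (unit_pos : Int) (parts : List String) : List String :=
  if h : n > 0 then
    let four := PySem.Int.mod n 10000
    let n' := PySem.Int.floordiv n 10000
    if four = 0 then aLoop n' (unit_pos + 1) parts
    else
      let small_str := aInner four
      let small_str := if PySem.List.pyGetD krBig unit_pos "" ≠ "" then
          small_str ++ PySem.List.pyGetD krBig unit_pos "" else small_str
      aLoop n' (unit_pos + 1) (parts ++ [small_str])
  else parts
termination_by n.toNat
decreasing_by
  all_goals (rw [PySem.Int.floordiv_eq_ediv_of_pos (by omega : (0:Int) < 10000)]; omega)

-- n = int(float(n)) is the identity for |n| ≤ 2^31 (floats are exact below 2^53)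
def int_to_korean_amount_py (n : Int) : String :=
  if n = 0 then "영"
  else if n < 0 then "마이너스 " ++ int_to_korean_amount_py (-n)
  else PySem.Str.strip (PySem.Str.join " " (aLoop n 0 []).reverse)
termination_by (if n < 0 then 1 else 0)
decreasing_by split_ifs <;> omega

-- ===== PORT B =====
-- B's `while n:` digit loop; it is only ever entered with n ≥ 0, where Python's
-- truthiness test `while n:` is exactly `while n > 0`
def altDigits (n : Int) (digits : List Int) : List Int :=
  if h : n > 0 then
    altDigits (PySem.Int.floordiv n 10) (digits ++ [PySem.Int.mod n 10])
  else digits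
termination_by n.toNat
decreasing_by
  all_goals (rw [PySem.Int.floordiv_eq_ediv_of_pos (by omega : (0:Int) < 10)]; omega)

-- the body of B's `for p, d in enumerate(digits)` loop (L = len(digits));
-- list indexing again ported with pyGetD, exact whenever the index is in range
def altStep (L : Int) (st : String × String) (pd : Int × Int) : String × String :=
  let p := pd.1
  let d := pd.2
  let group := if d ≠ 0 then
      ((if d = 1 ∧ PySem.Int.mod p 4 ≠ 0 then "" else PySem.List.pyGetD krNum d "")
        ++ PySem.List.pyGetD krSmall (PySem.Int.mod p 4) "") ++ st.2
    else st.2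
  if PySem.Int.mod p 4 = 3 ∨ p = L - 1 then
    (if group ≠ "" then
      let piece := group ++ PySem.List.pyGetD krBig (PySem.Int.floordiv p 4) ""
      if st.1 ≠ "" then piece ++ " " ++ st.1 else piece
     else st.1, "")
  else (st.1, group)

-- n = int(float(n)) is the identity for |n| ≤ 2^31 (floats are exact below 2^53)
def int_to_korean_amount_py_alt (n : Int) : String :=
  if n = 0 then "영"
  else if n < 0 then "마이너스 " ++ int_to_korean_amount_py_alt (-n)
  else
    let digits := altDigits n []
    ((PySem.List.enumerate digits 0).foldl (altStep (digits.length : Int)) ("", "")).1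
termination_by (if n < 0 then 1 else 0)
decreasing_by split_ifs <;> omega

-- ===== PRECONDITION & SPEC =====
def Spec_int_to_korean_amount_py (n : Int) (out : String) : Prop := out = int_to_korean_amount_py_alt n
instance (n : Int) (out : String) : Decidable (Spec_int_to_korean_amount_py n out) := by unfold Spec_int_to_korean_amount_py; infer_instance

-- ===== CLAIM (what is proved, stated in full; the proofs are below) =====
def Claim_equal_int_to_korean_amount_py : Prop := ∀ (n : Int), Dom_int_to_korean_amount_py n → Spec_int_to_korean_amount_py n (int_to_korean_amount_py n)

-- ===== LEMMAS AND PROOFS =====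

-- canonical per-digit token, per-chunk string, and the list of nonzero chunk
-- strings (most significant first) that both programs produce
def tokS (d i : Nat) : String :=
  if d ≠ 0 then
    (if ¬ (d = 1 ∧ i > 0) then krNum.getD d "" else "") ++ krSmall.getD i ""
  else ""

def coreS (f : Nat) : String :=
  tokS (f/1000%10) 3 ++ (tokS (f/100%10) 2 ++ (tokS (f/10%10) 1 ++ tokS (f%10) 0))

def chunkS (f k : Nat) : String := coreS f ++ krBig.getD k ""

def specS (m k : Nat) : List String :=
  if hm : m = 0 then []
  else specS (m/10000) (k+1) ++ (if m % 10000 = 0 then [] else [chunkS (m % 10000) k])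
termination_by m
decreasing_by omega

def mapCast (l : List Nat) : List Int := l.map (fun d => Int.ofNat d)

lemma mapCast_nil : mapCast [] = [] := rfl
lemma mapCast_cons (a : Nat) (t : List Nat) :
    mapCast (a :: t) = ((a : Nat) : Int) :: mapCast t := rfl
lemma mapCast_append (l1 l2 : List Nat) :
    mapCast (l1 ++ l2) = mapCast l1 ++ mapCast l2 := by simp [mapCast]
lemma length_mapCast (l : List Nat) : (mapCast l).length = l.length := by simp [mapCast]

-- back-to-front joiner (B's accumulation pattern)
def JS (l : List String) (out : String) : String :=
  l.foldr (fun c acc => if acc = "" then c else c ++ " " ++ acc) out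

-- decimal digits, least significant first
def digsN (m : Nat) : List Nat :=
  if m = 0 then [] else m % 10 :: digsN (m/10)
termination_by m
decreasing_by omega

lemma digsN_pos {m : Nat} (h : m ≠ 0) : digsN m = m % 10 :: digsN (m/10) := by
  rw [digsN]; simp [h]

lemma digsN_zero : digsN 0 = [] := by rw [digsN]; rw [if_pos rfl]

lemma digsN_ne_nil {m : Nat} (h : m ≠ 0) : digsN m ≠ [] := by
  rw [digsN_pos h]; simp

lemma digsN_big {m : Nat} (h : 10000 ≤ m) :
    digsN m = [m % 10, m/10 % 10, m/100 % 10, m/1000 % 10] ++ digsN (m/10000) := by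
  rw [digsN_pos (by omega), digsN_pos (by omega), digsN_pos (by omega), digsN_pos (by omega)]
  norm_num [Nat.div_div_eq_div_mul]

lemma specS_zero (k : Nat) : specS 0 k = [] := by rw [specS]; rw [dif_pos rfl]

lemma specS_pos {m : Nat} (h : m ≠ 0) (k : Nat) :
    specS m k = specS (m/10000) (k+1) ++ (if m % 10000 = 0 then [] else [chunkS (m % 10000) k]) := by
  rw [specS]; simp [h]

lemma JS_append_singleton (l : List String) (c out : String) :
    JS (l ++ [c]) out = JS l (if out = "" then c else c ++ " " ++ out) := by
  simp [JS, List.foldr_append]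

lemma JS_single (c out : String) :
    (if out ≠ "" then c ++ " " ++ out else c) = JS [c] out := by
  unfold JS
  dsimp only [List.foldr]
  by_cases h : out = ""
  · rw [if_neg (by simp [h]), if_pos h]
  · rw [if_pos h, if_neg h]

lemma flip_if (c out : String) :
    (if out ≠ "" then c ++ " " ++ out else c) = (if out = "" then c else c ++ " " ++ out) := by
  by_cases h : out = "" <;> simp [h]

-- String basics
lemma str_ne_empty_iff (s : String) : s ≠ "" ↔ s.toList ≠ [] := by
  constructor
  · intro h hc; exact h (String.toList_inj.mp (by simpa using hc))
  · intro h hc; exact h (by simp [hc])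

lemma append_ne_empty_left {a : String} (b : String) (h : a ≠ "") : a ++ b ≠ "" := by
  rw [str_ne_empty_iff] at *
  simp only [String.toList_append]
  intro hc
  exact h (List.append_eq_nil_iff.mp hc).1

lemma append_ne_empty_right (a : String) {b : String} (h : b ≠ "") : a ++ b ≠ "" := by
  rw [str_ne_empty_iff] at *
  simp only [String.toList_append]
  intro hc
  exact h (List.append_eq_nil_iff.mp hc).2

-- no-whitespace predicate
def noWS (s : String) : Prop := ∀ c ∈ s.toList, PySem.Chars.isspace c = false

lemma noWS_empty : noWS "" := by intro c hc; simp at hc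

lemma noWS_lit (s : String)
    (h : (s.toList.all (fun c => !PySem.Chars.isspace c)) = true) : noWS s := by
  intro c hc
  have := List.all_eq_true.mp h c hc
  simpa using this

lemma noWS_append {a b : String} (ha : noWS a) (hb : noWS b) : noWS (a ++ b) := by
  intro c hc
  rw [String.toList_append, List.mem_append] at hc
  rcases hc with h | h
  · exact ha c h
  · exact hb c h

lemma noWS_getD_krNum (d : Nat) : noWS (krNum.getD d "") := by
  by_cases h : d < 10
  · interval_cases d <;> exact noWS_lit _ (by decide)
  · rw [List.getD_eq_default _ _ (by simp [krNum]; omega)]; exact noWS_empty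

lemma noWS_getD_krSmall (i : Nat) : noWS (krSmall.getD i "") := by
  by_cases h : i < 4
  · interval_cases i <;> exact noWS_lit _ (by decide)
  · rw [List.getD_eq_default _ _ (by simp [krSmall]; omega)]; exact noWS_empty

lemma noWS_getD_krBig (k : Nat) : noWS (krBig.getD k "") := by
  by_cases h : k < 5
  · interval_cases k <;> exact noWS_lit _ (by decide)
  · rw [List.getD_eq_default _ _ (by simp [krBig]; omega)]; exact noWS_empty

lemma noWS_tokS (d i : Nat) : noWS (tokS d i) := by
  unfold tokS
  split_ifs <;>
    first
      | exact noWS_empty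
      | exact noWS_append (noWS_getD_krNum d) (noWS_getD_krSmall i)
      | exact noWS_append noWS_empty (noWS_getD_krSmall i)

lemma noWS_chunkS (f k : Nat) : noWS (chunkS f k) := by
  unfold chunkS coreS
  exact noWS_append (noWS_append (noWS_tokS _ _) (noWS_append (noWS_tokS _ _)
    (noWS_append (noWS_tokS _ _) (noWS_tokS _ _)))) (noWS_getD_krBig k)

lemma tokS_zero (i : Nat) : tokS 0 i = "" := by simp [tokS]

lemma tokS_ne {d i : Nat} (hd : d ≠ 0) (hd' : d < 10) (hi : i < 4) : tokS d i ≠ "" := by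
  have h1 : 1 ≤ d := by omega
  interval_cases d <;> interval_cases i <;> decide

lemma coreS_ne {f : Nat} (hf : f ≠ 0) (hf' : f < 10000) : coreS f ≠ "" := by
  unfold coreS
  by_cases h0 : f % 10 ≠ 0
  · exact append_ne_empty_right _ (append_ne_empty_right _
      (append_ne_empty_right _ (tokS_ne h0 (by omega) (by omega))))
  by_cases h1 : f/10 % 10 ≠ 0
  · exact append_ne_empty_right _ (append_ne_empty_right _
      (append_ne_empty_left _ (tokS_ne h1 (by omega) (by omega))))
  by_cases h2 : f/100 % 10 ≠ 0
  · exact append_ne_empty_right _ (append_ne_empty_left _ (tokS_ne h2 (by omega) (by omega)))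
  have h3 : f/1000 % 10 ≠ 0 := by omega
  exact append_ne_empty_left _ (tokS_ne h3 (by omega) (by omega))

lemma coreS_zero : coreS 0 = "" := by
  rw [coreS]
  norm_num [tokS_zero, String.append_empty]

lemma chunkS_ne {f : Nat} (hf : f ≠ 0) (hf' : f < 10000) (k : Nat) : chunkS f k ≠ "" :=
  append_ne_empty_left _ (coreS_ne hf hf')

lemma specS_prop : ∀ m k, ∀ s ∈ specS m k, s ≠ "" ∧ noWS s := by
  intro m
  induction m using Nat.strong_induction_on with
  | _ m IH =>
    intro k s hs
    by_cases hm : m = 0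
    · rw [hm, specS_zero] at hs; simp at hs
    · rw [specS_pos hm] at hs
      rw [List.mem_append] at hs
      rcases hs with h | h
      · exact IH (m/10000) (by omega) (k+1) s h
      · by_cases hz : m % 10000 = 0
        · simp [hz] at h
        · rw [if_neg hz, List.mem_singleton] at h
          subst h
          exact ⟨chunkS_ne hz (by omega) k, noWS_chunkS _ _⟩

-- Str.join at the String level
lemma sjoin_nil (sep : String) : PySem.Str.join sep [] = "" := by
  apply String.toList_inj.mp
  simp [PySem.Str.join, PySem.Chars.join_nil]

lemma sjoin_singleton (sep a : String) : PySem.Str.join sep [a] = a := by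
  apply String.toList_inj.mp
  simp [PySem.Str.join, PySem.Chars.join_singleton]

lemma sjoin_cons_cons (sep a b : String) (t : List String) :
    PySem.Str.join sep (a :: b :: t) = a ++ sep ++ PySem.Str.join sep (b :: t) := by
  apply String.toList_inj.mp
  simp [PySem.Str.join, PySem.Chars.join_cons_cons]

lemma JS_ne_empty : ∀ l : List String, l ≠ [] → (∀ s ∈ l, s ≠ "") → JS l "" ≠ "" := by
  intro l
  induction l with
  | nil => intro h; exact absurd rfl h
  | cons a t ih =>
    intro _ hall
    show (if JS t "" = "" then a else a ++ " " ++ JS t "") ≠ ""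
    split_ifs with h
    · exact hall a (by simp)
    · exact append_ne_empty_left _ (append_ne_empty_left _ (hall a (by simp)))

lemma join_eq_JS : ∀ l : List String, (∀ s ∈ l, s ≠ "") → PySem.Str.join " " l = JS l "" := by
  intro l
  induction l with
  | nil => intro _; rw [sjoin_nil]; rfl
  | cons a t ih =>
    intro hall
    cases t with
    | nil => rw [sjoin_singleton]; rfl
    | cons b t2 =>
      rw [sjoin_cons_cons]
      have hJ : JS (b :: t2) "" ≠ "" := JS_ne_empty _ (by simp) (fun s hs => hall s (by simp [hs]))
      show a ++ " " ++ PySem.Str.join " " (b :: t2) =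
        if JS (b :: t2) "" = "" then a else a ++ " " ++ JS (b :: t2) ""
      rw [if_neg hJ, ih (fun s hs => hall s (by simp [hs]))]

-- strip is the identity on a join of nonempty whitespace-free parts
lemma dropWhile_stable_head {p : Char → Bool} {l : List Char} (h : List.dropWhile p l = l)
    (hne : l ≠ []) : ∃ c r, l = c :: r ∧ p c = false := by
  cases l with
  | nil => exact absurd rfl hne
  | cons c r =>
    refine ⟨c, r, rfl, ?_⟩
    by_contra hc
    have hpc : p c = true := by simpa using hc
    rw [List.dropWhile_cons, if_pos hpc] at h
    have h1 := List.length_dropWhile_le p r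
    have h2 : (List.dropWhile p r).length = r.length + 1 := by rw [h]; simp
    omega

lemma join_chars_ne_nil (a : List Char) (t : List (List Char)) (ha : a ≠ []) :
    PySem.Chars.join [' '] (a :: t) ≠ [] := by
  cases t with
  | nil => rw [PySem.Chars.join_singleton]; exact ha
  | cons b t2 =>
    rw [PySem.Chars.join_cons_cons]
    intro hc
    rw [List.append_eq_nil_iff] at hc
    exact ha (List.append_eq_nil_iff.mp hc.1).1

lemma lstrip_join (parts : List (List Char))
    (h : ∀ p ∈ parts, p ≠ [] ∧ ∀ c ∈ p, PySem.Chars.isspace c = false) :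
    List.dropWhile PySem.Chars.isspace (PySem.Chars.join [' '] parts)
      = PySem.Chars.join [' '] parts := by
  cases parts with
  | nil => rw [PySem.Chars.join_nil]; rfl
  | cons a t =>
    obtain ⟨hane, hanw⟩ := h a (by simp)
    obtain ⟨c, r, hcr⟩ : ∃ c r, a = c :: r := by
      cases a with
      | nil => exact absurd rfl hane
      | cons c r => exact ⟨c, r, rfl⟩
    have hc : PySem.Chars.isspace c = false := hanw c (by simp [hcr])
    cases t with
    | nil =>
      rw [PySem.Chars.join_singleton, hcr, List.dropWhile_cons, if_neg (by simp [hc])]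
    | cons b t2 =>
      rw [PySem.Chars.join_cons_cons, hcr]
      simp only [List.cons_append, List.dropWhile_cons,
        if_neg (show ¬ (PySem.Chars.isspace c = true) by simp [hc])]

lemma rstrip_join : ∀ parts : List (List Char),
    (∀ p ∈ parts, p ≠ [] ∧ ∀ c ∈ p, PySem.Chars.isspace c = false) →
    List.dropWhile PySem.Chars.isspace (PySem.Chars.join [' '] parts).reverse
      = (PySem.Chars.join [' '] parts).reverse := by
  intro parts
  induction parts with
  | nil => intro _; rw [PySem.Chars.join_nil]; rfl
  | cons a t ih =>
    intro h
    obtain ⟨hane, hanw⟩ := h a (by simp)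
    cases t with
    | nil =>
      rw [PySem.Chars.join_singleton]
      obtain ⟨c, r, hcr⟩ : ∃ c r, a.reverse = c :: r := by
        cases hrev : a.reverse with
        | nil => exact absurd (by simpa using hrev) hane
        | cons c r => exact ⟨c, r, rfl⟩
      have hcm : c ∈ a := by
        have : c ∈ a.reverse := by rw [hcr]; simp
        simpa using this
      rw [hcr, List.dropWhile_cons, if_neg (by simp [hanw c hcm])]
    | cons b t2 =>
      rw [PySem.Chars.join_cons_cons]
      have hJ : PySem.Chars.join [' '] (b :: t2) ≠ [] :=
        join_chars_ne_nil b t2 (h b (by simp)).1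
      have ihh := ih (fun p hp => h p (by simp [hp]))
      obtain ⟨c, r, hcr, hc⟩ := dropWhile_stable_head ihh (by simpa using hJ)
      rw [List.append_assoc, List.reverse_append, List.reverse_append, hcr]
      simp only [List.reverse_cons, List.reverse_nil, List.nil_append, List.cons_append]
      rw [List.dropWhile_cons, if_neg (by simp [hc])]

lemma strip_join (l : List String) (h : ∀ s ∈ l, s ≠ "" ∧ noWS s) :
    PySem.Str.strip (PySem.Str.join " " l) = PySem.Str.join " " l := by
  have hparts : ∀ p ∈ l.map String.toList, p ≠ [] ∧ ∀ c ∈ p, PySem.Chars.isspace c = false := by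
    intro p hp
    rw [List.mem_map] at hp
    obtain ⟨s, hs, rfl⟩ := hp
    obtain ⟨h1, h2⟩ := h s hs
    exact ⟨(str_ne_empty_iff s).mp h1, h2⟩
  have hsep : (" " : String).toList = [' '] := by decide
  apply String.toList_inj.mp
  rw [PySem.Str.strip, PySem.Str.join, String.toList_ofList, String.toList_ofList, hsep]
  unfold PySem.Chars.strip PySem.Chars.lstrip PySem.Chars.rstrip
  rw [lstrip_join _ hparts, rstrip_join _ hparts, List.reverse_reverse]

-- ===== A-side characterization =====

def tokA (d i : Int) : String :=
  (if ¬ (d = 1 ∧ i > 0) then PySem.List.pyGetD krNum d "" else "")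
    ++ PySem.List.pyGetD krSmall i ""

lemma aStep_eq (x : Int) (acc : List String) (i : Int) :
    aStep (x, acc) i = (PySem.Int.floordiv x 10,
      if PySem.Int.mod x 10 = 0 then acc else acc ++ [tokA (PySem.Int.mod x 10) i]) := by
  unfold aStep tokA
  dsimp only
  by_cases h : PySem.Int.mod x 10 = 0
  · rw [if_neg (not_not_intro h), if_pos h]
  · rw [if_pos h, if_neg h]

lemma tokA_c0 (d : Nat) (hd : d ≠ 0) : tokA (d:Int) (0:Int) = tokS d 0 := by
  unfold tokA tokS
  rw [if_pos hd]
  rw [show (0:Int) = ((0:Nat):Int) from by norm_num]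
  rw [PySem.List.pyGetD_natCast, PySem.List.pyGetD_natCast]
  congr 1
  exact if_congr (by omega) rfl rfl

lemma tokA_c1 (d : Nat) (hd : d ≠ 0) : tokA (d:Int) (1:Int) = tokS d 1 := by
  unfold tokA tokS
  rw [if_pos hd]
  rw [show (1:Int) = ((1:Nat):Int) from by norm_num]
  rw [PySem.List.pyGetD_natCast, PySem.List.pyGetD_natCast]
  congr 1
  exact if_congr (by omega) rfl rfl

lemma tokA_c2 (d : Nat) (hd : d ≠ 0) : tokA (d:Int) (2:Int) = tokS d 2 := by
  unfold tokA tokS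
  rw [if_pos hd]
  rw [show (2:Int) = ((2:Nat):Int) from by norm_num]
  rw [PySem.List.pyGetD_natCast, PySem.List.pyGetD_natCast]
  congr 1
  exact if_congr (by omega) rfl rfl

lemma tokA_c3 (d : Nat) (hd : d ≠ 0) : tokA (d:Int) (3:Int) = tokS d 3 := by
  unfold tokA tokS
  rw [if_pos hd]
  rw [show (3:Int) = ((3:Nat):Int) from by norm_num]
  rw [PySem.List.pyGetD_natCast, PySem.List.pyGetD_natCast]
  congr 1
  exact if_congr (by omega) rfl rfl

lemma aInner_eq (f : Nat) : aInner (f:Int) = coreS f := by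
  have hr : PySem.List.pyRange 0 4 1 = [0,1,2,3] := by decide
  have hmod : ∀ a : Nat, PySem.Int.mod (a:Int) 10 = ((a % 10 : Nat) : Int) := by
    intro a; exact_mod_cast PySem.Int.mod_natCast a 10
  have hdiv : ∀ a : Nat, PySem.Int.floordiv (a:Int) 10 = ((a / 10 : Nat) : Int) := by
    intro a; exact_mod_cast PySem.Int.floordiv_natCast a 10
  unfold aInner
  rw [hr]
  simp only [List.foldl_cons, List.foldl_nil, aStep_eq, hmod, hdiv,
    show f/10/10 = f/100 from by omega, show f/100/10 = f/1000 from by omega,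
    Nat.cast_eq_zero]
  by_cases h0 : f % 10 = 0 <;> by_cases h1 : f/10 % 10 = 0 <;>
    by_cases h2 : f/100 % 10 = 0 <;> by_cases h3 : f/1000 % 10 = 0 <;>
    simp only [h0, h1, h2, h3, eq_self_iff_true, if_true, if_false, not_false_iff,
      coreS, tokS_zero,
      List.nil_append, List.cons_append, List.append_nil, List.reverse_cons,
      List.reverse_nil, sjoin_nil, sjoin_singleton, sjoin_cons_cons,
      String.append_empty, String.empty_append, String.append_assoc] <;>
    (try rw [tokA_c3 _ h3]) <;> (try rw [tokA_c2 _ h2]) <;> (try rw [tokA_c1 _ h1]) <;>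
    (try rw [tokA_c0 _ h0]) <;> (try rfl)

lemma aLoop_eq : ∀ m k : Nat, ∀ parts : List String,
    aLoop (m:Int) (k:Int) parts = parts ++ (specS m k).reverse := by
  intro m
  induction m using Nat.strong_induction_on with
  | _ m IH =>
    intro k parts
    by_cases hm : m = 0
    · subst hm
      rw [aLoop, dif_neg (by omega), specS_zero]
      simp
    · have hmod : PySem.Int.mod (m:Int) 10000 = ((m % 10000 : Nat) : Int) := by
        exact_mod_cast PySem.Int.mod_natCast m 10000
      have hdiv : PySem.Int.floordiv (m:Int) 10000 = ((m / 10000 : Nat) : Int) := by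
        exact_mod_cast PySem.Int.floordiv_natCast m 10000
      rw [aLoop, dif_pos (by exact_mod_cast Nat.pos_of_ne_zero hm)]
      simp only [hmod, hdiv]
      have hk1 : (k:Int) + 1 = ((k+1 : Nat) : Int) := by push_cast; ring
      by_cases hz : m % 10000 = 0
      · rw [if_pos (by exact_mod_cast hz), hk1, IH (m/10000) (by omega) (k+1) parts,
          specS_pos hm, if_pos hz]
        simp
      · rw [if_neg (by exact_mod_cast hz)]
        rw [aInner_eq (m % 10000)]
        rw [PySem.List.pyGetD_natCast]
        have hchunk : (if krBig.getD k "" ≠ "" then coreS (m % 10000) ++ krBig.getD k ""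
            else coreS (m % 10000)) = chunkS (m % 10000) k := by
          by_cases hb : krBig.getD k "" = ""
          · rw [if_neg (not_not_intro hb), chunkS, hb, String.append_empty]
          · rw [if_pos hb, chunkS]
        rw [hchunk, hk1, IH (m/10000) (by omega) (k+1) (parts ++ [chunkS (m % 10000) k]),
          specS_pos hm, if_neg hz]
        simp

-- ===== B-side characterization =====

lemma altDigits_eq : ∀ m : Nat, ∀ acc : List Int,
    altDigits (m:Int) acc = acc ++ mapCast (digsN m) := by
  intro m
  induction m using Nat.strong_induction_on with
  | _ m IH =>
    intro acc
    by_cases hm : m = 0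
    · subst hm
      rw [altDigits, dif_neg (by omega), digsN_zero]
      simp [mapCast]
    · have hmod : PySem.Int.mod (m:Int) 10 = ((m % 10 : Nat) : Int) := by
        exact_mod_cast PySem.Int.mod_natCast m 10
      have hdiv : PySem.Int.floordiv (m:Int) 10 = ((m / 10 : Nat) : Int) := by
        exact_mod_cast PySem.Int.floordiv_natCast m 10
      rw [altDigits, dif_pos (by exact_mod_cast Nat.pos_of_ne_zero hm), hmod, hdiv,
        IH (m/10) (by omega) (acc ++ [((m % 10 : Nat) : Int)]), digsN_pos hm]
      simp [mapCast_cons]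

-- one token step of B's loop body, aligned with tokS
lemma tokStep (d i : Nat) (p : Int) (g : String) (hp : PySem.Int.mod p 4 = (i:Int)) :
    (if (d:Int) ≠ 0 then
      ((if (d:Int) = 1 ∧ PySem.Int.mod p 4 ≠ 0 then "" else PySem.List.pyGetD krNum (d:Int) "")
        ++ PySem.List.pyGetD krSmall (PySem.Int.mod p 4) "") ++ g
     else g) = tokS d i ++ g := by
  rw [hp, PySem.List.pyGetD_natCast, PySem.List.pyGetD_natCast]
  by_cases hd : d = 0
  · subst hd
    rw [if_neg (by simp)]
    rw [tokS_zero, String.empty_append]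
  · rw [if_pos (by exact_mod_cast hd)]
    unfold tokS
    rw [if_pos hd]
    congr 2
    have hiff : ((d:Int) = 1 ∧ (i:Int) ≠ 0) ↔ ¬ ¬ (d = 1 ∧ i > 0) := by omega
    rw [if_congr hiff rfl rfl]
    by_cases hc : ¬ (d = 1 ∧ i > 0)
    · rw [if_neg (by simpa using hc), if_pos hc]
    · rw [if_pos (by simpa using hc), if_neg hc]

lemma altStep_mid (L p : Int) (dn i : Nat) (st : String × String)
    (hp : PySem.Int.mod p 4 = (i:Int))
    (hcond : ¬ (PySem.Int.mod p 4 = 3 ∨ p = L - 1)) :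
    altStep L st (p, (dn:Int)) = (st.1, tokS dn i ++ st.2) := by
  unfold altStep
  dsimp only
  rw [if_neg hcond, tokStep dn i p st.2 hp]

lemma altStep_flush (L p : Int) (dn i j : Nat) (out g : String)
    (hp : PySem.Int.mod p 4 = (i:Int))
    (hcond : PySem.Int.mod p 4 = 3 ∨ p = L - 1)
    (hj : PySem.Int.floordiv p 4 = (j:Int)) :
    altStep L (out, g) (p, (dn:Int)) =
      (if tokS dn i ++ g ≠ "" then
        (if out ≠ "" then ((tokS dn i ++ g) ++ krBig.getD j "") ++ " " ++ out
         else (tokS dn i ++ g) ++ krBig.getD j "")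
       else out, "") := by
  unfold altStep
  dsimp only
  rw [if_pos hcond, tokStep dn i p g hp, hj, PySem.List.pyGetD_natCast]

-- positions of digit p = 4*j + i
lemma mod4_0 (j : Nat) : PySem.Int.mod (4*(j:Int)) 4 = ((0:Nat):Int) := by
  rw [PySem.Int.mod_eq_emod_of_pos (by omega)]; push_cast; omega
lemma mod4_1 (j : Nat) : PySem.Int.mod (4*(j:Int)+1) 4 = ((1:Nat):Int) := by
  rw [PySem.Int.mod_eq_emod_of_pos (by omega)]; push_cast; omega
lemma mod4_2 (j : Nat) : PySem.Int.mod (4*(j:Int)+1+1) 4 = ((2:Nat):Int) := by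
  rw [PySem.Int.mod_eq_emod_of_pos (by omega)]; push_cast; omega
lemma mod4_3 (j : Nat) : PySem.Int.mod (4*(j:Int)+1+1+1) 4 = ((3:Nat):Int) := by
  rw [PySem.Int.mod_eq_emod_of_pos (by omega)]; push_cast; omega
lemma fdiv4_0 (j : Nat) : PySem.Int.floordiv (4*(j:Int)) 4 = (j:Int) := by
  rw [PySem.Int.floordiv_eq_ediv_of_pos (by omega)]; omega
lemma fdiv4_1 (j : Nat) : PySem.Int.floordiv (4*(j:Int)+1) 4 = (j:Int) := by
  rw [PySem.Int.floordiv_eq_ediv_of_pos (by omega)]; omega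
lemma fdiv4_2 (j : Nat) : PySem.Int.floordiv (4*(j:Int)+1+1) 4 = (j:Int) := by
  rw [PySem.Int.floordiv_eq_ediv_of_pos (by omega)]; omega
lemma fdiv4_3 (j : Nat) : PySem.Int.floordiv (4*(j:Int)+1+1+1) 4 = (j:Int) := by
  rw [PySem.Int.floordiv_eq_ediv_of_pos (by omega)]; omega

lemma alt_fold (L : Int) : ∀ m : Nat, m ≠ 0 → ∀ (j : Nat) (out : String),
    L = 4*(j:Int) + ((digsN m).length : Int) →
    (PySem.List.enumerate (mapCast (digsN m)) (4*(j:Int))).foldl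
        (altStep L) (out, "")
      = (JS (specS m j) out, "") := by
  intro m
  induction m using Nat.strong_induction_on with
  | _ m IH =>
    intro hm j out hL
    by_cases hbig : 10000 ≤ m
    · -- a full 4-digit chunk followed by the rest
      have hrest0 : m / 10000 ≠ 0 := by omega
      have hlen : 1 ≤ (digsN (m/10000)).length :=
        List.length_pos_iff.mpr (digsN_ne_nil hrest0)
      rw [digsN_big hbig] at hL ⊢
      simp only [List.length_append, List.length_cons, List.length_nil] at hL
      simp only [mapCast_append, mapCast_cons, mapCast_nil,
        PySem.List.enumerate_append, PySem.List.enumerate_cons, PySem.List.enumerate_nil,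
        List.length_cons, List.length_nil, Nat.reduceAdd, Nat.cast_ofNat, List.nil_append,
        List.foldl_append, List.foldl_cons, List.foldl_nil]
      rw [altStep_mid L _ (m % 10) 0 _ (mod4_0 j)
            (by rw [mod4_0 j]; omega),
          altStep_mid L _ (m/10 % 10) 1 _ (mod4_1 j)
            (by rw [mod4_1 j]; omega),
          altStep_mid L _ (m/100 % 10) 2 _ (mod4_2 j)
            (by rw [mod4_2 j]; omega),
          altStep_flush L _ (m/1000 % 10) 3 j _ _ (mod4_3 j)
            (by rw [mod4_3 j]; exact Or.inl (by omega)) (fdiv4_3 j)]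
      have hg : tokS (m/1000 % 10) 3 ++ (tokS (m/100 % 10) 2 ++ (tokS (m/10 % 10) 1
          ++ (tokS (m % 10) 0 ++ ""))) = coreS (m % 10000) := by
        rw [coreS, show m % 10000 / 1000 % 10 = m/1000 % 10 from by omega,
          show m % 10000 / 100 % 10 = m/100 % 10 from by omega,
          show m % 10000 / 10 % 10 = m/10 % 10 from by omega,
          show m % 10000 % 10 = m % 10 from by omega, String.append_empty]
      rw [hg]
      have hstart : (4*(j:Int)+4 : Int) = 4*((j+1 : Nat):Int) := by omega
      have hL' : L = 4*((j+1 : Nat):Int) + ((digsN (m/10000)).length : Int) := by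
        omega
      by_cases hz : m % 10000 = 0
      · rw [hz, coreS_zero, if_neg (by simp)]
        rw [hstart, IH (m/10000) (by omega) hrest0 (j+1) out hL']
        rw [specS_pos hm, if_pos hz, List.append_nil]
      · rw [if_pos (coreS_ne hz (by omega))]
        have hch : coreS (m % 10000) ++ krBig.getD j "" = chunkS (m % 10000) j := rfl
        rw [hch, flip_if]
        rw [hstart, IH (m/10000) (by omega) hrest0 (j+1) _ hL']
        rw [specS_pos hm, if_neg hz, JS_append_singleton]
    · -- the final partial chunk (1 to 4 digits)
      by_cases hA : m < 10
      · have hds : digsN m = [m % 10] := by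
          rw [digsN_pos hm, show m/10 = 0 from by omega, digsN_zero]
        rw [hds] at hL ⊢
        simp only [List.length_cons, List.length_nil] at hL
        simp only [
          PySem.List.enumerate_cons, PySem.List.enumerate_nil,
          List.foldl_cons, List.foldl_nil, mapCast_cons, mapCast_nil]
        rw [altStep_flush L _ (m % 10) 0 j _ _ (mod4_0 j)
              (by right; omega) (fdiv4_0 j)]
        have hg : tokS (m % 10) 0 ++ "" = coreS m := by
          rw [coreS, show m/1000 % 10 = 0 from by omega, show m/100 % 10 = 0 from by omega,
            show m/10 % 10 = 0 from by omega, tokS_zero, tokS_zero, tokS_zero,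
            String.empty_append, String.empty_append, String.empty_append,
            String.append_empty]
        rw [hg, if_pos (coreS_ne hm (by omega))]
        have hch : coreS m ++ krBig.getD j "" = chunkS m j := rfl
        rw [hch, JS_single]
        rw [specS_pos hm, show m/10000 = 0 from by omega, specS_zero,
          show m % 10000 = m from by omega, if_neg hm, List.nil_append]
      · by_cases hB : m < 100
        · have hds : digsN m = [m % 10, m/10 % 10] := by
            rw [digsN_pos hm, digsN_pos (by omega), show m/10/10 = 0 from by omega, digsN_zero]
          rw [hds] at hL ⊢
          simp only [List.length_cons, List.length_nil] at hL
          simp only [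
            PySem.List.enumerate_cons, PySem.List.enumerate_nil,
            List.foldl_cons, List.foldl_nil, mapCast_cons, mapCast_nil]
          rw [altStep_mid L _ (m % 10) 0 _ (mod4_0 j)
                (by rw [mod4_0 j]; omega),
              altStep_flush L _ (m/10 % 10) 1 j _ _ (mod4_1 j)
                (by right; omega) (fdiv4_1 j)]
          have hg : tokS (m/10 % 10) 1 ++ (tokS (m % 10) 0 ++ "") = coreS m := by
            rw [coreS, show m/1000 % 10 = 0 from by omega, show m/100 % 10 = 0 from by omega,
              tokS_zero, tokS_zero, String.empty_append, String.empty_append,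
              String.append_empty]
          rw [hg, if_pos (coreS_ne hm (by omega))]
          have hch : coreS m ++ krBig.getD j "" = chunkS m j := rfl
          rw [hch, JS_single]
          rw [specS_pos hm, show m/10000 = 0 from by omega, specS_zero,
            show m % 10000 = m from by omega, if_neg hm, List.nil_append]
        · by_cases hC : m < 1000
          · have hds : digsN m = [m % 10, m/10 % 10, m/100 % 10] := by
              rw [digsN_pos hm, digsN_pos (by omega), digsN_pos (by omega),
                show m/10/10 = m/100 from by omega, show m/100/10 = 0 from by omega,
                digsN_zero]
            rw [hds] at hL ⊢
            simp only [List.length_cons, List.length_nil] at hL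
            simp only [
              PySem.List.enumerate_cons, PySem.List.enumerate_nil,
              List.foldl_cons, List.foldl_nil, mapCast_cons, mapCast_nil]
            rw [altStep_mid L _ (m % 10) 0 _ (mod4_0 j)
                  (by rw [mod4_0 j]; omega),
                altStep_mid L _ (m/10 % 10) 1 _ (mod4_1 j)
                  (by rw [mod4_1 j]; omega),
                altStep_flush L _ (m/100 % 10) 2 j _ _ (mod4_2 j)
                  (by right; omega) (fdiv4_2 j)]
            have hg : tokS (m/100 % 10) 2 ++ (tokS (m/10 % 10) 1 ++ (tokS (m % 10) 0 ++ ""))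
                = coreS m := by
              rw [coreS, show m/1000 % 10 = 0 from by omega, tokS_zero,
                String.empty_append, String.append_empty]
            rw [hg, if_pos (coreS_ne hm (by omega))]
            have hch : coreS m ++ krBig.getD j "" = chunkS m j := rfl
            rw [hch, JS_single]
            rw [specS_pos hm, show m/10000 = 0 from by omega, specS_zero,
              show m % 10000 = m from by omega, if_neg hm, List.nil_append]
          · have hds : digsN m = [m % 10, m/10 % 10, m/100 % 10, m/1000 % 10] := by
              rw [digsN_pos hm, digsN_pos (by omega), digsN_pos (by omega),
                digsN_pos (by omega), show m/10/10 = m/100 from by omega,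
                show m/100/10 = m/1000 from by omega, show m/1000/10 = 0 from by omega,
                digsN_zero]
            rw [hds] at hL ⊢
            simp only [List.length_cons, List.length_nil] at hL
            simp only [
              PySem.List.enumerate_cons, PySem.List.enumerate_nil,
              List.foldl_cons, List.foldl_nil, mapCast_cons, mapCast_nil]
            rw [altStep_mid L _ (m % 10) 0 _ (mod4_0 j)
                  (by rw [mod4_0 j]; omega),
                altStep_mid L _ (m/10 % 10) 1 _ (mod4_1 j)
                  (by rw [mod4_1 j]; omega),
                altStep_mid L _ (m/100 % 10) 2 _ (mod4_2 j)
                  (by rw [mod4_2 j]; omega),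
                altStep_flush L _ (m/1000 % 10) 3 j _ _ (mod4_3 j)
                  (by rw [mod4_3 j]; exact Or.inl (by omega)) (fdiv4_3 j)]
            have hg : tokS (m/1000 % 10) 3 ++ (tokS (m/100 % 10) 2 ++ (tokS (m/10 % 10) 1
                ++ (tokS (m % 10) 0 ++ ""))) = coreS m := by
              rw [coreS, String.append_empty]
            rw [hg, if_pos (coreS_ne hm (by omega))]
            have hch : coreS m ++ krBig.getD j "" = chunkS m j := rfl
            rw [hch, JS_single]
            rw [specS_pos hm, show m/10000 = 0 from by omega, specS_zero,
              show m % 10000 = m from by omega, if_neg hm, List.nil_append]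

-- ===== assembly =====

lemma pos_eq (m : Nat) (hm : m ≠ 0) :
    int_to_korean_amount_py (m:Int) = int_to_korean_amount_py_alt (m:Int) := by
  have hm0 : ¬((m:Int) = 0) := by exact_mod_cast hm
  have hmneg : ¬((m:Int) < 0) := by omega
  rw [int_to_korean_amount_py, int_to_korean_amount_py_alt,
    if_neg hm0, if_neg hm0, if_neg hmneg, if_neg hmneg]
  -- A-side
  have hA := aLoop_eq m 0 []
  simp only [Nat.cast_zero] at hA
  rw [hA, List.nil_append, List.reverse_reverse,
    strip_join _ (specS_prop m 0),
    join_eq_JS _ (fun s hs => (specS_prop m 0 s hs).1)]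
  -- B-side
  have hD := altDigits_eq m []
  simp only [List.nil_append] at hD
  have hF := alt_fold ((mapCast (digsN m)).length : Int) m hm 0 ""
    (by simp [length_mapCast])
  simp only [Nat.cast_zero, mul_zero] at hF
  simp only [hD, hF]

-- ===== VERDICT (by name: the statement is the Claim_ definition above) =====
theorem int_to_korean_amount_py_spec : Claim_equal_int_to_korean_amount_py := by
  intro n _
  unfold Spec_int_to_korean_amount_py
  by_cases h0 : n = 0
  · subst h0
    rw [int_to_korean_amount_py, int_to_korean_amount_py_alt, if_pos rfl, if_pos rfl]
  · by_cases hneg : n < 0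
    · rw [int_to_korean_amount_py, int_to_korean_amount_py_alt,
        if_neg h0, if_neg h0, if_pos hneg, if_pos hneg]
      have hcast : -n = (((-n).toNat : Nat) : Int) := by omega
      rw [hcast, pos_eq _ (by omega)]
    · have hcast : n = ((n.toNat : Nat) : Int) := by omega
      rw [hcast, pos_eq _ (by omega)]
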